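-- pv_equiv track=rewrite | github.com/causify-ai/helpers | create_class_projects.py | _extract_level2_sections
-- ===== SOURCE A (Python) =====
-- from typing import Dict, List, Tuple
--
-- def _extract_level2_sections(file_content: str) -> List[Tuple[str, str]]:
--     """
--     Extract level 2 headers and their content from markdown.
--
--     :param file_content: The markdown file content
--     :return: List of tuples (header, content)
--     """
--     lines = file_content.split('\n')
--     sections = []
--     current_header = None
--     current_content = []
--
--     for line in lines:
--         if line.startswith('## '):
--             # Save previous section if exists.
--             if current_header is not None:
--                 sections.append((current_header, '\n'.join(current_content)))
--             # Start new section.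
--             current_header = line
--             current_content = []
--         elif line.startswith('# '):
--             # Level 1 header - save previous section if exists.
--             if current_header is not None:
--                 sections.append((current_header, '\n'.join(current_content)))
--                 current_header = None
--                 current_content = []
--         else:
--             # Content line.
--             if current_header is not None:
--                 current_content.append(line)
--
--     # Save last section if exists.
--     if current_header is not None:
--         sections.append((current_header, '\n'.join(current_content)))
--
--     return sections
-- ===== SOURCE B (Python) =====
-- from typing import Dict, List, Tuple
--
-- def _extract_level2_sections(file_content: str) -> List[Tuple[str, str]]:
--     """Two-pointer scan: for each level-2 header, scan ahead to the next boundary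
--     (either header level) and slice that range as the section content."""
--     lines = file_content.split('\n')
--     n = len(lines)
--     sections = []
--     i = 0
--     while i < n:
--         if lines[i].startswith('## '):
--             j = i + 1
--             while j < n and not (lines[j].startswith('## ') or lines[j].startswith('# ')):
--                 j += 1
--             sections.append((lines[i], '\n'.join(lines[i + 1:j])))
--             i = j
--         else:
--             i += 1
--     return sections
-- ===== Notes on version B (the rewrite author's own statement) =====
-- stated objective: alternative
-- what changed: Replaced A's flat accumulator state machine (current_header/current_content carried across one for-loop) by a two-pointer scan: an outer loop finds each level-2 header and an inner scan advances to the next boundary line, slicing and joining that range as the content.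
import Mathlib
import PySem

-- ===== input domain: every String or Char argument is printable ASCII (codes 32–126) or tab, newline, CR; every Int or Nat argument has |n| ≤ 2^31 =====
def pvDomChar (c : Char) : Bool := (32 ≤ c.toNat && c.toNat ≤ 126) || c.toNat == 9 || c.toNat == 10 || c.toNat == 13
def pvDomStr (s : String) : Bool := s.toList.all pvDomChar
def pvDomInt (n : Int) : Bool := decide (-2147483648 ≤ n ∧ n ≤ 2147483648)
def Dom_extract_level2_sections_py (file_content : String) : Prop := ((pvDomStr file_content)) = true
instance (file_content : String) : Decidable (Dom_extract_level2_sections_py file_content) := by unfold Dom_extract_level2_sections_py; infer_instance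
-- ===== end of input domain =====

-- B replaces A's flat accumulator state machine by a two-pointer scan
-- (for each level-2 header, scan ahead to the next boundary and slice); objective: alternative.

-- ===== PORT A =====
-- loop body of A's for-loop: state = (sections, current_header, current_content)
def pvStepA (st : List (String × String) × Option String × List String) (line : String) :
    List (String × String) × Option String × List String :=
  let (sections, current_header, current_content) := st
  if PySem.Str.startswith line "## " then
    match current_header with
    | some h => (sections ++ [(h, PySem.Str.join "\n" current_content)], some line, [])
    | none => (sections, some line, [])
  else if PySem.Str.startswith line "# " then
    match current_header with
    | some h => (sections ++ [(h, PySem.Str.join "\n" current_content)], none, [])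
    | none => (sections, none, current_content)
  else
    match current_header with
    | some _ => (sections, current_header, current_content ++ [line])
    | none => (sections, current_header, current_content)

def extract_level2_sections_py (file_content : String) : List (String × String) :=
  let lines := (PySem.Str.split? file_content "\n").getD []
  let st := lines.foldl pvStepA ([], none, [])
  match st.2.1 with
  | some h => st.1 ++ [(h, PySem.Str.join "\n" st.2.2)]
  | none => st.1

-- ===== PORT B =====
def pvIsBoundary (l : String) : Bool :=
  PySem.Str.startswith l "## " || PySem.Str.startswith l "# "

-- B's inner while loop: advance until the next boundary line, returning (content, rest)
def pvSpanB : List String → List String × List String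
  | [] => ([], [])
  | x :: xs =>
    if pvIsBoundary x then ([], x :: xs)
    else
      let p := pvSpanB xs
      (x :: p.1, p.2)

theorem pvSpanB_len (xs : List String) : (pvSpanB xs).2.length ≤ xs.length := by
  induction xs with
  | nil => simp [pvSpanB]
  | cons x xs ih =>
    simp only [pvSpanB]
    split
    · simp
    · simpa using Nat.le_succ_of_le ih

-- B's outer while loop
def pvGoB : List String → List (String × String)
  | [] => []
  | l :: rest =>
    if PySem.Str.startswith l "## " then
      let p := pvSpanB rest
      (l, PySem.Str.join "\n" p.1) :: pvGoB p.2
    else pvGoB rest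
termination_by xs => xs.length
decreasing_by
  · have := pvSpanB_len rest; simp; omega
  · simp

def extract_level2_sections_py_alt (file_content : String) : List (String × String) :=
  pvGoB ((PySem.Str.split? file_content "\n").getD [])

-- ===== PRECONDITION & SPEC =====
def Spec_extract_level2_sections_py (file_content : String) (out : List (String × String)) : Prop := out = extract_level2_sections_py_alt file_content
instance (file_content : String) (out : List (String × String)) : Decidable (Spec_extract_level2_sections_py file_content out) := by unfold Spec_extract_level2_sections_py; infer_instance

-- ===== CLAIM (what is proved, stated in full; the proofs are below) =====
def Claim_equal_extract_level2_sections_py : Prop := ∀ (file_content : String), Dom_extract_level2_sections_py file_content → Spec_extract_level2_sections_py file_content (extract_level2_sections_py file_content)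

-- ===== LEMMAS AND PROOFS =====

-- A's final "save last section" step
def pvFinish (st : List (String × String) × Option String × List String) : List (String × String) :=
  match st.2.1 with
  | some h => st.1 ++ [(h, PySem.Str.join "\n" st.2.2)]
  | none => st.1

theorem pvMain (lines : List String) :
    (∀ s, pvFinish (lines.foldl pvStepA (s, none, [])) = s ++ pvGoB lines) ∧
    (∀ s h c, pvFinish (lines.foldl pvStepA (s, some h, c)) =
      s ++ [(h, PySem.Str.join "\n" (c ++ (pvSpanB lines).1))] ++ pvGoB (pvSpanB lines).2) := by
  induction lines with
  | nil => simp [pvFinish, pvGoB, pvSpanB]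
  | cons l rest ih =>
    obtain ⟨ih1, ih2⟩ := ih
    by_cases h2 : PySem.Chars.startswith l.toList ['#', '#', ' '] = true
    · have hgo : pvGoB (l :: rest) =
          (l, PySem.Str.join "\n" (pvSpanB rest).1) :: pvGoB (pvSpanB rest).2 := by
        rw [pvGoB]; simp [PySem.Str.startswith, h2]
      have hsp : pvSpanB (l :: rest) = ([], l :: rest) := by
        simp [pvSpanB, pvIsBoundary, PySem.Str.startswith, h2]
      constructor
      · intro s
        have harg : pvStepA (s, none, []) l = (s, some l, []) := by
          simp [pvStepA, PySem.Str.startswith, h2]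
        rw [List.foldl_cons, harg, (by exact ih2 s l [] :), hgo]
        simp
      · intro s h c
        have harg : pvStepA (s, some h, c) l =
            (s ++ [(h, PySem.Str.join "\n" c)], some l, []) := by
          simp [pvStepA, PySem.Str.startswith, h2]
        rw [List.foldl_cons, harg, (by exact ih2 (s ++ [(h, PySem.Str.join "\n" c)]) l [] :),
          hsp, hgo]
        simp
    · by_cases h1 : PySem.Chars.startswith l.toList ['#', ' '] = true
      · have hgo : pvGoB (l :: rest) = pvGoB rest := by
          rw [pvGoB]; simp [PySem.Str.startswith, h2]
        have hsp : pvSpanB (l :: rest) = ([], l :: rest) := by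
          simp [pvSpanB, pvIsBoundary, PySem.Str.startswith, h1]
        constructor
        · intro s
          have harg : pvStepA (s, none, []) l = (s, none, []) := by
            simp [pvStepA, PySem.Str.startswith, h2, h1]
          rw [List.foldl_cons, harg, ih1 s, hgo]
        · intro s h c
          have harg : pvStepA (s, some h, c) l =
              (s ++ [(h, PySem.Str.join "\n" c)], none, []) := by
            simp [pvStepA, PySem.Str.startswith, h2, h1]
          rw [List.foldl_cons, harg, ih1 (s ++ [(h, PySem.Str.join "\n" c)]), hsp, hgo]
          simp
      · have hgo : pvGoB (l :: rest) = pvGoB rest := by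
          rw [pvGoB]; simp [PySem.Str.startswith, h2]
        have hsp : pvSpanB (l :: rest) = (l :: (pvSpanB rest).1, (pvSpanB rest).2) := by
          simp [pvSpanB, pvIsBoundary, PySem.Str.startswith, h2, h1]
        constructor
        · intro s
          have harg : pvStepA (s, none, []) l = (s, none, []) := by
            simp [pvStepA, PySem.Str.startswith, h2, h1]
          rw [List.foldl_cons, harg, ih1 s, hgo]
        · intro s h c
          have harg : pvStepA (s, some h, c) l = (s, some h, c ++ [l]) := by
            simp [pvStepA, PySem.Str.startswith, h2, h1]
          rw [List.foldl_cons, harg, (by exact ih2 s h (c ++ [l]) :), hsp]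
          simp

-- ===== VERDICT (by name: the statement is the Claim_ definition above) =====
theorem extract_level2_sections_py_spec : Claim_equal_extract_level2_sections_py := by
  intro file_content _
  unfold Spec_extract_level2_sections_py extract_level2_sections_py extract_level2_sections_py_alt
  have := (pvMain ((PySem.Str.split? file_content "\n").getD [])).1 []
  simpa [pvFinish] using this
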